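-- pv_equiv track=rewrite | github.com/SZNASKME/AutomateDEV | Stonebranch/App/Features/API/Get/CheckTaskMonitor/cleanJsonToExcel.py | prepareTaskMonitorRowsSummary
-- ===== SOURCE A (Python) =====
-- def prepareTaskMonitorRowsSummary(json_data, unique_task_monitor_list):
--     task_monitor_summary_rows = []
--     for task_monitor in unique_task_monitor_list:
--         task_list = []
--         workflow_list = []
--         trigger_list = []
--         for trigger_name, trigger_data in json_data.items():
--             for workflow_name, workflow_data in trigger_data.items():
--                 for task_name, task_monitor_list in workflow_data.items():
--                     if task_monitor in task_monitor_list: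
--                         if workflow_name not in workflow_list:
--                             workflow_list.append(workflow_name)
--                         if task_name not in task_list:
--                             task_list.append(task_name)
--                         if trigger_name not in trigger_list:
--                             trigger_list.append(trigger_name)
--         task_monitor_summary_row = {
--             'Task Monitor': task_monitor,
--             'Trigger workflow': ', '.join(workflow_list),
--             'Sub workflow': ', '.join(task_list),
--             'Triggers': ', '.join(trigger_list)
--         }
--         task_monitor_summary_rows.append(task_monitor_summary_row)
--     return task_monitor_summary_rows
-- ===== SOURCE B (Python) =====
-- def prepareTaskMonitorRowsSummary(json_data, unique_task_monitor_list):
--     # Single pass over json_data building an index keyed by task monitor,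
--     # then one lookup per requested monitor (instead of rescanning json_data per monitor).
--     index = {}
--     for trigger_name, trigger_data in json_data.items():
--         for workflow_name, workflow_data in trigger_data.items():
--             for task_name, task_monitor_list in workflow_data.items():
--                 for task_monitor in task_monitor_list:
--                     entry = index.get(task_monitor)
--                     if entry is None:
--                         entry = ([], [], [])
--                         index[task_monitor] = entry
--                     task_list, workflow_list, trigger_list = entry
--                     if workflow_name not in workflow_list:
--                         workflow_list.append(workflow_name)
--                     if task_name not in task_list:
--                         task_list.append(task_name)
--                     if trigger_name not in trigger_list:
--                         trigger_list.append(trigger_name)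
--     rows = []
--     for task_monitor in unique_task_monitor_list:
--         task_list, workflow_list, trigger_list = index.get(task_monitor, ([], [], []))
--         rows.append({
--             'Task Monitor': task_monitor,
--             'Trigger workflow': ', '.join(workflow_list),
--             'Sub workflow': ', '.join(task_list),
--             'Triggers': ', '.join(trigger_list),
--         })
--     return rows
-- ===== Notes on version B (the rewrite author's own statement) =====
-- stated objective: faster
-- what changed: Instead of rescanning all of json_data once per task monitor, B makes a single pass over json_data building a dict from task monitor to its three ordered deduplicated lists, then emits one row per requested monitor by lookup.
import Mathlib
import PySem

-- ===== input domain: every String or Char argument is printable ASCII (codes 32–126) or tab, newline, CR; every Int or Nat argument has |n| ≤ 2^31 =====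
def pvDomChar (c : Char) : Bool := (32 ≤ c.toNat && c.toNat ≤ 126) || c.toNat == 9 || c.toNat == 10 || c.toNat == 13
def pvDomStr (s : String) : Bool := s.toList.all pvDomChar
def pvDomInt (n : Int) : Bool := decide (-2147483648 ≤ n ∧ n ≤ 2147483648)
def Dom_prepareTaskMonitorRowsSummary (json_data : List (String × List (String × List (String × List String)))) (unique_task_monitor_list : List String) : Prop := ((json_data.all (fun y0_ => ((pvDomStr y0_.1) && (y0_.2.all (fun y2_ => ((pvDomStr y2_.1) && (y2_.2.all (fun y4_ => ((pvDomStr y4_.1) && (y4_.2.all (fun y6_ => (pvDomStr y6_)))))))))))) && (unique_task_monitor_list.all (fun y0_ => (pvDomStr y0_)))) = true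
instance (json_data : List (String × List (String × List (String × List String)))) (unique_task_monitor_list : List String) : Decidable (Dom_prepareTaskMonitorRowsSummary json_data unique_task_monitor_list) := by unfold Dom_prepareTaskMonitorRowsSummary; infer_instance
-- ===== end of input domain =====

-- B replaces A's per-monitor rescans of json_data by one indexing pass plus per-monitor lookups (faster, asymptotic).

-- shared little helpers: the `if x not in xs: xs.append(x)` line, the summary-row dict literal,
-- and the combined update of the three lists (identical lines in both Pythons)
abbrev pvE := List String × List String × List String

def pvE0 : pvE := ([], [], [])

def pvAddIf (xs : List String) (x : String) : List String :=
  if x ∈ xs then xs else xs ++ [x]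

-- state is (task_list, workflow_list, trigger_list); args are (trigger, workflow, task) names
def pvStep (tn wn taskn : String) (e : pvE) : pvE :=
  (pvAddIf e.1 taskn, pvAddIf e.2.1 wn, pvAddIf e.2.2 tn)

def pvRow (tm : String) (st : pvE) : List (String × String) :=
  [("Task Monitor", tm),
   ("Trigger workflow", PySem.Str.join ", " st.2.1),
   ("Sub workflow", PySem.Str.join ", " st.1),
   ("Triggers", PySem.Str.join ", " st.2.2)]

-- ===== PORT A =====
def prepareTaskMonitorRowsSummary (json_data : List (String × List (String × List (String × List String)))) (unique_task_monitor_list : List String) : List (List (String × String)) :=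
  unique_task_monitor_list.foldl (fun rows tm =>
    let st := json_data.foldl (fun st p =>
      p.2.foldl (fun st q =>
        q.2.foldl (fun st r =>
          if tm ∈ r.2 then pvStep p.1 q.1 r.1 st else st) st) st) pvE0
    rows ++ [pvRow tm st]) []

-- ===== PORT B =====
def prepareTaskMonitorRowsSummary_alt (json_data : List (String × List (String × List (String × List String)))) (unique_task_monitor_list : List String) : List (List (String × String)) :=
  let index : PySem.Dict String pvE :=
    json_data.foldl (fun idx p =>
      p.2.foldl (fun idx q =>
        q.2.foldl (fun idx r =>
          r.2.foldl (fun idx tm =>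
            idx.insert tm (pvStep p.1 q.1 r.1 (idx.getD tm pvE0))) idx) idx) idx) PySem.Dict.empty
  unique_task_monitor_list.map (fun tm => pvRow tm (index.getD tm pvE0))

-- ===== PRECONDITION & SPEC =====
def Spec_prepareTaskMonitorRowsSummary (json_data : List (String × List (String × List (String × List String)))) (unique_task_monitor_list : List String) (out : List (List (String × String))) : Prop := out = prepareTaskMonitorRowsSummary_alt json_data unique_task_monitor_list
instance (json_data : List (String × List (String × List (String × List String)))) (unique_task_monitor_list : List String) (out : List (List (String × String))) : Decidable (Spec_prepareTaskMonitorRowsSummary json_data unique_task_monitor_list out) := by unfold Spec_prepareTaskMonitorRowsSummary; infer_instance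

-- ===== CLAIM (what is proved, stated in full; the proofs are below) =====
def Claim_equal_prepareTaskMonitorRowsSummary : Prop := ∀ (json_data : List (String × List (String × List (String × List String)))) (unique_task_monitor_list : List String), Dom_prepareTaskMonitorRowsSummary json_data unique_task_monitor_list → Spec_prepareTaskMonitorRowsSummary json_data unique_task_monitor_list (prepareTaskMonitorRowsSummary json_data unique_task_monitor_list)

-- ===== LEMMAS AND PROOFS =====

lemma pvAddIf_idem (xs : List String) (x : String) : pvAddIf (pvAddIf xs x) x = pvAddIf xs x := by
  unfold pvAddIf
  split_ifs with h1 h2 <;> simp_all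

lemma pvStep_idem (tn wn taskn : String) (e : pvE) :
    pvStep tn wn taskn (pvStep tn wn taskn e) = pvStep tn wn taskn e := by
  simp [pvStep, pvAddIf_idem]

-- looking up tm after B's innermost loop over a task-monitor list = A's single conditional update
lemma lookup_foldl_tml (tn wn taskn tm : String) :
    ∀ (tml : List String) (idx : PySem.Dict String pvE),
      (tml.foldl (fun idx x => idx.insert x (pvStep tn wn taskn (idx.getD x pvE0))) idx).getD tm pvE0
        = if tm ∈ tml then pvStep tn wn taskn (idx.getD tm pvE0) else idx.getD tm pvE0 := by
  intro tml
  induction tml with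
  | nil => simp
  | cons x rest ih =>
    intro idx
    simp only [List.foldl_cons, ih, PySem.Dict.getD_insert, List.mem_cons]
    by_cases hx : tm = x
    · subst hx
      by_cases hr : tm ∈ rest <;> simp [hr, pvStep_idem]
    · by_cases hr : tm ∈ rest <;> simp [hx, hr]

-- looking up tm commutes with a fold that updates the index elementwise
lemma lookup_foldl_comm {α : Type} (tm : String)
    (g : PySem.Dict String pvE → α → PySem.Dict String pvE) (f : pvE → α → pvE)
    (h : ∀ idx a, (g idx a).getD tm pvE0 = f (idx.getD tm pvE0) a) :
    ∀ (l : List α) (idx : PySem.Dict String pvE),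
      (l.foldl g idx).getD tm pvE0 = l.foldl f (idx.getD tm pvE0) := by
  intro l
  induction l with
  | nil => intro idx; rfl
  | cons a rest ih => intro idx; simp only [List.foldl_cons, ih, h]

-- the index B builds, looked up at tm, is exactly A's per-monitor accumulation
lemma index_lookup (json_data : List (String × List (String × List (String × List String)))) (tm : String) :
    (json_data.foldl (fun idx p =>
      p.2.foldl (fun idx q =>
        q.2.foldl (fun idx r =>
          r.2.foldl (fun idx x =>
            idx.insert x (pvStep p.1 q.1 r.1 (idx.getD x pvE0))) idx) idx) idx)
        PySem.Dict.empty).getD tm pvE0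
    = json_data.foldl (fun st p =>
        p.2.foldl (fun st q =>
          q.2.foldl (fun st r =>
            if tm ∈ r.2 then pvStep p.1 q.1 r.1 st else st) st) st) pvE0 := by
  have h := lookup_foldl_comm tm
    (fun idx p =>
      p.2.foldl (fun idx q =>
        q.2.foldl (fun idx r =>
          r.2.foldl (fun idx x =>
            idx.insert x (pvStep p.1 q.1 r.1 (idx.getD x pvE0))) idx) idx) idx)
    (fun st p =>
      p.2.foldl (fun st q =>
        q.2.foldl (fun st r =>
          if tm ∈ r.2 then pvStep p.1 q.1 r.1 st else st) st) st)
    (fun idx p => lookup_foldl_comm tm _ _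
      (fun idx q => lookup_foldl_comm tm _ _
        (fun idx r => lookup_foldl_tml p.1 q.1 r.1 tm r.2 idx) q.2 idx) p.2 idx)
    json_data PySem.Dict.empty
  simpa using h

lemma foldl_append_rows (rowf : String → List (String × String)) :
    ∀ (l : List String) (acc : List (List (String × String))),
      l.foldl (fun rows tm => rows ++ [rowf tm]) acc = acc ++ l.map rowf := by
  intro l
  induction l with
  | nil => simp
  | cons x rest ih => intro acc; simp [List.foldl_cons, ih]

-- ===== VERDICT (by name: the statement is the Claim_ definition above) =====
theorem prepareTaskMonitorRowsSummary_spec : Claim_equal_prepareTaskMonitorRowsSummary := by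
  intro json_data utml _
  unfold Spec_prepareTaskMonitorRowsSummary prepareTaskMonitorRowsSummary prepareTaskMonitorRowsSummary_alt
  rw [foldl_append_rows (fun tm => pvRow tm
    (json_data.foldl (fun st p =>
      p.2.foldl (fun st q =>
        q.2.foldl (fun st r =>
          if tm ∈ r.2 then pvStep p.1 q.1 r.1 st else st) st) st) pvE0)) utml []]
  simp only [List.nil_append]
  refine List.map_congr_left (fun tm _ => ?_)
  rw [index_lookup]
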